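-- pv_equiv track=rewrite | github.com/jbuchermn/dotfiles | package.py | find_bottom
-- ===== SOURCE A (Python) =====
-- def find_bottom(layer, all_layers):
--     """
--     Pick all candidates, s.t. layer starts with <candidate>-
--     """
--     candidates = [l for l in all_layers if layer.startswith(l + '-')]
--
--     """
--     Find the one highest up in the hierarchy
--     """
--     while True:
--         next_candidates = []
--         for c in candidates:
--             if find_bottom(c, candidates) is not None:
--                 next_candidates += [c]
--
--         if len(next_candidates) == 0:
--             if len(candidates) > 1:
--                 raise Exception("Something went wrong")
--             return candidates[0] if len(candidates) > 0 else None
--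
--         candidates = next_candidates
-- ===== SOURCE B (Python) =====
-- def find_bottom(layer, all_layers):
--     """The candidates of one layer always form a prefix chain, so the result
--     is simply the longest l in all_layers such that layer starts with l + '-'.
--     If layer contains no '-' at all, no candidate can exist: skip the scan."""
--     if '-' not in layer:
--         return None
--     best = None
--     for l in all_layers:
--         if layer.startswith(l + '-') and (best is None or len(l) > len(best)):
--             best = l
--     return best
-- ===== Notes on version B (the rewrite author's own statement) =====
-- stated objective: faster
-- what changed: Replaces the nested recursive fixpoint loop (find_bottom re-invoked on every candidate each round) with a single pass keeping the longest prefix candidate (candidates of one layer form a prefix chain, so the longest is the answer), and returns None immediately when layer contains no '-' since then no candidate can exist; Pre_ excludes the duplicate-candidate inputs on which A raises Exception.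
import Mathlib
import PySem

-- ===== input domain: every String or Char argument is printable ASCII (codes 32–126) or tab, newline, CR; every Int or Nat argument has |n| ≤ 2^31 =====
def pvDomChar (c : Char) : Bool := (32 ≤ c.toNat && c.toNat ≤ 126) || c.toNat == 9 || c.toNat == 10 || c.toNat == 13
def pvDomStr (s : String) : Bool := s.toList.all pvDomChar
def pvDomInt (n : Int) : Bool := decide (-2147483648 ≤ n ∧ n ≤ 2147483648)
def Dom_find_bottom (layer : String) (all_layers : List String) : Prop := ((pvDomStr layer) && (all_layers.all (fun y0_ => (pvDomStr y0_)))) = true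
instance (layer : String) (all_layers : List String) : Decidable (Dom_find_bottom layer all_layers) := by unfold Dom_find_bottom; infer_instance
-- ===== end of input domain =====

-- B computes the same result in one pass keeping the longest prefix candidate, skipping the scan when layer has no '-' (objective: faster).
-- ===== PORT A =====
-- A's 'raise Exception("Something went wrong")' is modeled as 'none' (Pre_ excludes those inputs).
-- The Nat fuel only makes the recursion/while-loop total; on inputs Pre_ admits it never runs out.
def fbLoop (rec : String → List String → Option String) : Nat → List String → Option String
  | 0, _ => none
  | Nat.succ n, cands =>
    let next := cands.filter (fun c => (rec c cands).isSome)
    if next.length = 0 then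
      if 1 < cands.length then none          -- raise Exception  (outside Pre_)
      else if 0 < cands.length then PySem.List.pyGet? cands 0 else none
    else fbLoop rec n next

def find_bottomF : Nat → String → List String → Option String
  | 0, _, _ => none
  | Nat.succ n, layer, all_layers =>
    let candidates := all_layers.filter (fun l => PySem.Str.startswith layer (l ++ "-"))
    fbLoop (find_bottomF n) (candidates.length + 1) candidates

def find_bottom (layer : String) (all_layers : List String) : Option String :=
  find_bottomF (layer.toList.length + 1) layer all_layers

-- ===== PORT B =====
def find_bottom_alt (layer : String) (all_layers : List String) : Option String :=
  if PySem.Str.isIn "-" layer = false then none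
  else all_layers.foldl
    (fun best l =>
      if PySem.Str.startswith layer (l ++ "-") &&
         (match best with
          | none => true
          | some b => decide (PySem.Str.len b < PySem.Str.len l)) then some l else best)
    none

-- ===== PRECONDITION & SPEC =====
-- Pre_ excludes exactly the inputs on which A raises Exception: those where the
-- candidate list [l for l in all_layers if layer.startswith(l+'-')] has duplicates.
def Pre_find_bottom (layer : String) (all_layers : List String) : Prop :=
  (all_layers.filter (fun l => PySem.Str.startswith layer (l ++ "-"))).Nodup
instance (layer : String) (all_layers : List String) : Decidable (Pre_find_bottom layer all_layers) := by unfold Pre_find_bottom; infer_instance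

def pvWitness_find_bottom : String × List String := ("a-b-c", ["a", "a-b"])

def Spec_find_bottom (layer : String) (all_layers : List String) (out : Option String) : Prop := out = find_bottom_alt layer all_layers
instance (layer : String) (all_layers : List String) (out : Option String) : Decidable (Spec_find_bottom layer all_layers out) := by unfold Spec_find_bottom; infer_instance

-- ===== CLAIM (what is proved, stated in full; the proofs are below) =====
def Claim_equal_find_bottom : Prop := ∀ (layer : String) (all_layers : List String), Dom_find_bottom layer all_layers → Pre_find_bottom layer all_layers → Spec_find_bottom layer all_layers (find_bottom layer all_layers)

-- ===== LEMMAS AND PROOFS =====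

-- B's inner fold, applied to an already-filtered candidate list
def maxB (cs : List String) (acc : Option String) : Option String :=
  cs.foldl
    (fun best l =>
      if (match best with
          | none => true
          | some b => decide (PySem.Str.len b < PySem.Str.len l)) then some l else best)
    acc

theorem maxB_cons (c : String) (cs : List String) (acc : Option String) :
    maxB (c :: cs) acc =
      maxB cs (if (match acc with
                   | none => true
                   | some b => decide (PySem.Str.len b < PySem.Str.len c)) then some c else acc) := rfl

theorem maxB_some_isSome (cs : List String) (b : String) : (maxB cs (some b)).isSome := by
  induction cs generalizing b with
  | nil => rfl
  | cons c cs ih =>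
    rw [maxB_cons]
    by_cases h : PySem.Str.len b < PySem.Str.len c
    · rw [if_pos (by simpa using h)]; exact ih c
    · rw [if_neg (by simpa using h)]; exact ih b

theorem maxB_cons_isSome (c : String) (cs : List String) : (maxB (c :: cs) none).isSome := by
  simpa [maxB_cons] using maxB_some_isSome cs c

theorem maxB_const (cs : List String) (b : String)
    (h : ∀ l ∈ cs, ¬ (PySem.Str.len b < PySem.Str.len l)) :
    maxB cs (some b) = some b := by
  induction cs with
  | nil => rfl
  | cons c cs ih =>
    rw [maxB_cons, if_neg (by simpa using h c (by simp))]
    exact ih fun l hl => h l (by simp [hl])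

theorem maxB_eq (cs : List String) (M : String) (acc : Option String)
    (hM : M ∈ cs)
    (hmax : ∀ l ∈ cs, l ≠ M → PySem.Str.len l < PySem.Str.len M)
    (hacc : ∀ b, acc = some b → PySem.Str.len b < PySem.Str.len M) :
    maxB cs acc = some M := by
  induction cs generalizing acc with
  | nil => cases hM
  | cons c cs ih =>
    rw [maxB_cons]
    by_cases hc : c = M
    · subst hc
      have hstep :
          (if (match acc with
               | none => true
               | some b => decide (PySem.Str.len b < PySem.Str.len c)) then some c else acc) = some c := by
        cases acc with
        | none => rfl
        | some b => rw [if_pos (by simpa using hacc b rfl)]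
      rw [hstep]
      exact maxB_const cs c fun l hl => by
        by_cases hlc : l = c
        · subst hlc; omega
        · exact not_lt.mpr (le_of_lt (hmax l (by simp [hl]) hlc))
    · have hM' : M ∈ cs := by
        rcases List.mem_cons.mp hM with h | h
        · exact absurd h.symm hc
        · exact h
      have hclt : PySem.Str.len c < PySem.Str.len M := hmax c (by simp) hc
      have hmax' : ∀ l ∈ cs, l ≠ M → PySem.Str.len l < PySem.Str.len M :=
        fun l hl hlM => hmax l (by simp [hl]) hlM
      cases acc with
      | none => exact ih (some c) hM' hmax' (fun b hb => by cases hb; exact hclt)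
      | some b =>
        by_cases h : PySem.Str.len b < PySem.Str.len c
        · rw [if_pos (by simpa using h)]
          exact ih (some c) hM' hmax' (fun b' hb' => by cases hb'; exact hclt)
        · rw [if_neg (by simpa using h)]
          exact ih (some b) hM' hmax' (fun b' hb' => by cases hb'; exact hacc b rfl)

-- B's scan unfolded to maxB over the filtered candidate list
theorem fold_eq_maxB (layer : String) (all_layers : List String) :
    all_layers.foldl
        (fun best l =>
          if PySem.Str.startswith layer (l ++ "-") &&
             (match best with
              | none => true
              | some b => decide (PySem.Str.len b < PySem.Str.len l)) then some l else best)
        none =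
      maxB (all_layers.filter (fun l => PySem.Str.startswith layer (l ++ "-"))) none := by
  unfold maxB
  rw [List.foldl_filter]
  congr 1
  funext best l
  cases h : PySem.Str.startswith layer (l ++ "-") <;> simp

-- prefix facts about candidates
theorem cand_prefix {layer l : String}
    (h : PySem.Str.startswith layer (l ++ "-") = true) :
    l.toList ++ ['-'] <+: layer.toList := by
  have := (PySem.Chars.startswith_iff (layer.toList) ((l ++ "-").toList)).mp (by simpa using h)
  simpa using this

theorem cand_startswith {layer l : String}
    (h : l.toList ++ ['-'] <+: layer.toList) :
    PySem.Str.startswith layer (l ++ "-") = true := by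
  rw [PySem.Str.startswith_eq]
  exact (PySem.Chars.startswith_iff _ _).mpr (by simpa using h)

-- if layer contains no '-', there is no candidate at all
theorem cands_nil_of_no_dash (layer : String) (all_layers : List String)
    (h : PySem.Str.isIn "-" layer = false) :
    all_layers.filter (fun l => PySem.Str.startswith layer (l ++ "-")) = [] := by
  refine List.filter_eq_nil_iff.mpr ?_
  intro l hl hsw
  have hp := cand_prefix hsw
  have hinf : ['-'] <:+: layer.toList :=
    ((List.suffix_append l.toList ['-']).isInfix).trans hp.isInfix
  have := (PySem.Str.isIn_iff_infix "-" layer).mpr (by simpa using hinf)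
  rw [h] at this
  cases this

theorem len_lt_of_cand {L : List Char} {c : String}
    (h : c.toList ++ ['-'] <+: L) : c.toList.length < L.length := by
  have := h.length_le
  simpa using this

theorem take_of_dash_prefix {L : List Char} {d : String}
    (h : d.toList ++ ['-'] <+: L) : d.toList = L.take d.toList.length := by
  have h2 := List.prefix_iff_eq_take.mp h
  have h3 := congrArg (List.take d.toList.length) h2
  rw [List.take_take] at h3
  simpa [List.take_left, Nat.min_def] using h3

theorem eq_of_len_eq {L : List Char} {c d : String}
    (hc : c.toList ++ ['-'] <+: L) (hd : d.toList ++ ['-'] <+: L)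
    (hlen : c.toList.length = d.toList.length) : c = d := by
  have hc' := take_of_dash_prefix hc
  have hd' := take_of_dash_prefix hd
  have : c.toList = d.toList := by rw [hc', hd', hlen]
  exact String.ext (by simpa [String.toList] using this)

theorem chain_of_cands {L : List Char} {c d : String}
    (hc : c.toList ++ ['-'] <+: L) (hd : d.toList ++ ['-'] <+: L)
    (hlen : c.toList.length < d.toList.length) :
    c.toList ++ ['-'] <+: d.toList := by
  have h1 : c.toList ++ ['-'] = L.take ((c.toList ++ ['-']).length) :=
    List.prefix_iff_eq_take.mp hc
  have h3 := take_of_dash_prefix hd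
  rw [List.prefix_iff_eq_take, h3, List.take_take]
  have hm : min ((c.toList ++ ['-']).length) d.toList.length = (c.toList ++ ['-']).length := by
    simp only [List.length_append, List.length_cons, List.length_nil]
    omega
  rw [hm, ← h1]

-- existence of a shortest / longest element (by induction on the list)
theorem exists_len_min (cs : List String) (h : cs ≠ []) :
    ∃ μ ∈ cs, ∀ l ∈ cs, μ.toList.length ≤ l.toList.length := by
  induction cs with
  | nil => exact absurd rfl h
  | cons c cs ih =>
    cases cs with
    | nil => exact ⟨c, by simp⟩
    | cons c1 cs1 =>
      obtain ⟨μ, hμ, hmin⟩ := ih (by simp)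
      by_cases hcm : c.toList.length ≤ μ.toList.length
      · exact ⟨c, by simp, by
          intro l hl
          rcases List.mem_cons.mp hl with h | h
          · subst h; omega
          · exact le_trans hcm (hmin l h)⟩
      · exact ⟨μ, by simp [hμ], by
          intro l hl
          rcases List.mem_cons.mp hl with h | h
          · subst h; omega
          · exact hmin l h⟩

theorem exists_len_max (cs : List String) (h : cs ≠ []) :
    ∃ M ∈ cs, ∀ l ∈ cs, l.toList.length ≤ M.toList.length := by
  induction cs with
  | nil => exact absurd rfl h
  | cons c cs ih =>
    cases cs with
    | nil => exact ⟨c, by simp⟩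
    | cons c1 cs1 =>
      obtain ⟨M, hM, hmax⟩ := ih (by simp)
      by_cases hcm : M.toList.length ≤ c.toList.length
      · exact ⟨c, by simp, by
          intro l hl
          rcases List.mem_cons.mp hl with h | h
          · subst h; omega
          · exact le_trans (hmax l h) hcm⟩
      · exact ⟨M, by simp [hM], by
          intro l hl
          rcases List.mem_cons.mp hl with h | h
          · subst h; omega
          · exact hmax l h⟩

-- the loop: on a nodup list of dash-prefixes of L, with a faithful rec, fbLoop returns the longest
theorem fbLoop_eq (rec : String → List String → Option String) (L : List Char)
    (hrec : ∀ c lst, c.toList ++ ['-'] <+: L → (∀ x ∈ lst, x.toList ++ ['-'] <+: L) →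
        lst.Nodup →
        rec c lst = maxB (lst.filter (fun l => PySem.Str.startswith c (l ++ "-"))) none) :
    ∀ m cs, cs.length < m → (∀ c ∈ cs, c.toList ++ ['-'] <+: L) → cs.Nodup →
      fbLoop rec m cs = maxB cs none := by
  intro m
  induction m with
  | zero => intro cs h _ _; omega
  | succ m ih =>
    intro cs hlen hpre hnd
    have hrecv : ∀ c ∈ cs, rec c cs = maxB (cs.filter (fun l => PySem.Str.startswith c (l ++ "-"))) none :=
      fun c hc => hrec c cs (hpre c hc) hpre hnd
    match cs, hlen, hpre, hnd, hrecv with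
    | [], _, _, _, _ => rfl
    | [c], _, hpre, _, hrecv =>
      have hf : (PySem.Str.startswith c (c ++ "-")) = false := by
        by_contra h
        have := len_lt_of_cand (L := c.toList) (cand_prefix (by simpa using h))
        omega
      have hflt : List.filter (fun l => PySem.Str.startswith c (l ++ "-")) [c] = [] := by
        rw [List.filter_cons_of_neg (by simpa using hf)]
        rfl
      have hr : rec c [c] = none := by
        rw [hrecv c (by simp), hflt]
        rfl
      rw [fbLoop]
      simp only [List.filter_cons, List.filter_nil, hr, Option.isSome_none, Bool.false_eq_true,
        if_false, List.length_nil]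
      rfl
    | c0 :: c1 :: cs1, hlen, hpre, hnd, hrecv =>
      set cs := c0 :: c1 :: cs1 with hcs
      have hne : cs ≠ [] := by simp [hcs]
      obtain ⟨μ, hμmem, hμmin⟩ := exists_len_min cs hne
      obtain ⟨M, hMmem, hMmax⟩ := exists_len_max cs hne
      -- distinct elements have distinct lengths
      have hdistinct : ∀ c ∈ cs, c ≠ μ → μ.toList.length < c.toList.length := by
        intro c hc hcm
        refine lt_of_le_of_ne (hμmin c hc) fun he => hcm ?_
        exact eq_of_len_eq (hpre c hc) (hpre μ hμmem) he.symm
      -- the filter keeps exactly the non-minimal candidates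
      have hfilter : cs.filter (fun c => (rec c cs).isSome) = cs.filter (fun c => decide (c ≠ μ)) := by
        refine List.filter_congr ?_
        intro c hc
        rw [hrecv c hc]
        by_cases hcm : c = μ
        · subst hcm
          have hnil : cs.filter (fun l => PySem.Str.startswith c (l ++ "-")) = [] := by
            refine List.filter_eq_nil_iff.mpr ?_
            intro l hl h
            have h1 := len_lt_of_cand (L := c.toList) (cand_prefix h)
            have h2 := hμmin l hl
            omega
          rw [hnil]
          simp [maxB]
        · have hlt := hdistinct c hc hcm
          have hsw := cand_startswith (chain_of_cands (hpre μ hμmem) (hpre c hc) hlt)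
          have hmemf : μ ∈ cs.filter (fun l => PySem.Str.startswith c (l ++ "-")) :=
            List.mem_filter.mpr ⟨hμmem, hsw⟩
          cases hfe : cs.filter (fun l => PySem.Str.startswith c (l ++ "-")) with
          | nil => rw [hfe] at hmemf; cases hmemf
          | cons a as => simp [maxB_cons_isSome a as, hcm]
      set next := cs.filter (fun c => decide (c ≠ μ)) with hnext
      -- M is the strict maximum and differs from μ
      have hMstrict : ∀ l ∈ cs, l ≠ M → PySem.Str.len l < PySem.Str.len M := by
        intro l hl hlM
        have h1 := hMmax l hl
        have h2 : l.toList.length ≠ M.toList.length := fun he =>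
          hlM (eq_of_len_eq (hpre l hl) (hpre M hMmem) he)
        simp only [PySem.Str.len_eq]
        omega
      have hMμ : M ≠ μ := by
        intro he
        have h01 : c0 ≠ c1 := (List.nodup_cons.mp hnd).1 ∘ fun h => by simp [h]
        have hl01 : c0.toList.length ≠ c1.toList.length := fun hle =>
          h01 (eq_of_len_eq (hpre c0 (by simp [hcs])) (hpre c1 (by simp [hcs])) hle)
        have := hμmin c0 (by simp [hcs])
        have := hμmin c1 (by simp [hcs])
        have := hMmax c0 (by simp [hcs])
        have := hMmax c1 (by simp [hcs])
        rw [he] at *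
        omega
      have hMnext : M ∈ next := List.mem_filter.mpr ⟨hMmem, by simpa using hMμ⟩
      have hnextlt : next.length < cs.length :=
        List.length_filter_lt_length_iff_exists.mpr ⟨μ, hμmem, by simp⟩
      have hnextne : next.length ≠ 0 := by
        intro h
        rw [List.length_eq_zero_iff] at h
        rw [h] at hMnext
        cases hMnext
      -- one loop step, then the induction hypothesis
      have hstep : fbLoop rec (m + 1) cs = fbLoop rec m next := by
        rw [fbLoop]
        simp only [hfilter]
        rw [if_neg hnextne]
      rw [hstep, ih next (by omega)
        (fun c hc => hpre c (List.mem_of_mem_filter hc)) (hnd.filter _)]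
      -- both sides are the strict maximum M
      rw [maxB_eq next M none hMnext
          (fun l hl hlM => hMstrict l (List.mem_of_mem_filter hl) hlM)
          (fun b hb => by cases hb),
        maxB_eq cs M none hMmem hMstrict (fun b hb => by cases hb)]

theorem find_bottomF_eq : ∀ f (layer : String) (lst : List String),
    layer.toList.length < f →
    (lst.filter (fun l => PySem.Str.startswith layer (l ++ "-"))).Nodup →
    find_bottomF f layer lst =
      maxB (lst.filter (fun l => PySem.Str.startswith layer (l ++ "-"))) none := by
  intro f
  induction f with
  | zero => intro layer lst h _; omega
  | succ n ih =>
    intro layer lst hf hnd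
    show fbLoop (find_bottomF n)
        ((lst.filter (fun l => PySem.Str.startswith layer (l ++ "-"))).length + 1)
        (lst.filter (fun l => PySem.Str.startswith layer (l ++ "-"))) = _
    refine fbLoop_eq (find_bottomF n) layer.toList ?_ _ _ (by omega)
      (fun c hc => cand_prefix (List.mem_filter.mp hc).2) hnd
    intro c lst' hcL hall hnd'
    have hlc : c.toList.length < n := by
      have := len_lt_of_cand hcL
      omega
    exact ih c lst' hlc (hnd'.filter _)

-- ===== VERDICT (by name: the statement is the Claim_ definition above) =====
theorem find_bottom_spec : Claim_equal_find_bottom := by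
  intro layer all_layers _ hpre
  unfold Spec_find_bottom find_bottom find_bottom_alt
  rw [find_bottomF_eq _ layer all_layers (by omega) hpre]
  cases hin : PySem.Str.isIn "-" layer with
  | false => rw [cands_nil_of_no_dash layer all_layers hin]; rfl
  | true => simp only [Bool.true_eq_false, if_false, fold_eq_maxB]
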